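-- pv_equiv track=rewrite | github.com/vrckomark/Advent-of-Code | 2023/day3/part2.py | getVerticalRow
-- ===== SOURCE A (Python) =====
-- def getVerticalRow(wholeRow,index):
--     row = wholeRow[index-3:index+4]
--     numbers=[]
--     number=""
--
--     for i,char in enumerate(row):
--         if char.isnumeric():
--             number+=char
--
--         if not char.isnumeric() and len(number)>0 or i==len(row)-1 and len(number)>0:
--
--             span = len(number)
--             number_indexes=[]
--             for idx in range(span):
--                 if i==len(row)-1 and char.isnumeric():
--                     number_indexes.append(i-span+idx+1)
--                 else:
--                     number_indexes.append(i-span+idx)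
--             if len(list(set(number_indexes) & set([2,3,4])))>0:
--                 numbers.append(int(number))
--             number=""
--
--     return numbers
-- ===== SOURCE B (Python) =====
-- def getVerticalRow(wholeRow, index):
--     row = wholeRow[index-3:index+4]
--     numbers = []
--     n = len(row)
--     i = 0
--     while i < n:
--         if row[i].isnumeric():
--             j = i + 1
--             while j < n and row[j].isnumeric():
--                 j += 1
--             if i <= 4 and j >= 3:
--                 numbers.append(int(row[i:j]))
--             i = j
--         else:
--             i += 1
--     return numbers
-- ===== Notes on version B (the rewrite author's own statement) =====
-- stated objective: simpler
-- what changed: Replaces the per-character accumulator with index-list reconstruction and set intersection by a two-pointer scan over maximal digit runs: each run [i,j) is appended directly when i <= 4 and j >= 3, which is exactly when the run overlaps columns 2..4.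
import Mathlib
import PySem

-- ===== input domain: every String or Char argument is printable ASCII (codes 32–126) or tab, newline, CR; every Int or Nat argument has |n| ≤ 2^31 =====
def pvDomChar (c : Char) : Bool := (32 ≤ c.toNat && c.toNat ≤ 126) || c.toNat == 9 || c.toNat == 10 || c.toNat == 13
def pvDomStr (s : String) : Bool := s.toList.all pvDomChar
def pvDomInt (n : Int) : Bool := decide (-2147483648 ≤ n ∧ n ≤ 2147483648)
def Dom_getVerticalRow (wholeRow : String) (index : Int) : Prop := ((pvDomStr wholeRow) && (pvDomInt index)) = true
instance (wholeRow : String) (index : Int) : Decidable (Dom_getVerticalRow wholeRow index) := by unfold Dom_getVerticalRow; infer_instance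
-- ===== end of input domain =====

-- B replaces A's per-character accumulator + rebuilt index list + set intersection by a
-- two-pointer scan over maximal digit runs (objective: simpler). str.isnumeric is ported as
-- PySem.Chars.isdigit, exact on the ASCII input domain.

-- B replaces A's per-character accumulator + rebuilt index list + set intersection by a
-- two-pointer scan over maximal digit runs (objective: simpler). Python's str.isnumeric is
-- ported as PySem.Chars.isdigit, exact on the ASCII input domain.

-- ===== PORT A =====
-- the loop body of A's 'for i,char in enumerate(row)' (state = (numbers, number))
def pvAstep (row : List Char) (st : List Int × List Char) (ic : Int × Char) : List Int × List Char :=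
  let i := ic.1
  let char := ic.2
  let number := if PySem.Chars.isdigit char then st.2 ++ [char] else st.2
  if (!PySem.Chars.isdigit char && decide (0 < number.length))
      || (i == (row.length : Int) - 1 && decide (0 < number.length)) then
    let span : Int := number.length
    let number_indexes := (PySem.List.pyRange 0 span 1).foldl (fun acc idx =>
        acc ++ [if i == (row.length : Int) - 1 && PySem.Chars.isdigit char
                then i - span + idx + 1 else i - span + idx]) []
    let numbers := if 0 < (PySem.Set.inter (PySem.Set.ofList number_indexes)
        (PySem.Set.ofList [2, 3, 4])).length
      then st.1 ++ [(PySem.Int.ofChars? number).getD 0] else st.1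
    (numbers, [])
  else (st.1, number)

def getVerticalRow (wholeRow : String) (index : Int) : List Int :=
  let row := PySem.List.slice wholeRow.toList (some (index - 3)) (some (index + 4))
  ((PySem.List.enumerate row 0).foldl (pvAstep row) ([], [])).1

-- ===== PORT B =====
-- inner while of Source B: first j ≥ start with row[j] not a digit (or len(row))
def pvRunEnd (row : List Char) (j : Nat) : Nat :=
  if h : j < row.length then
    if PySem.Chars.isdigit row[j] then pvRunEnd row (j + 1) else j
  else j
termination_by row.length - j

-- j > start when row[start] is a digit: needed by pvScan's termination
theorem pvRunEnd_ge (row : List Char) (j : Nat) : j ≤ pvRunEnd row j := by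
  fun_induction pvRunEnd row j with
  | case1 j h hd ih => omega
  | case2 j h hd => omega
  | case3 j h => omega

-- outer while of Source B, one step per run start / non-digit character
def pvScan (row : List Char) (i : Nat) (numbers : List Int) : List Int :=
  if h : i < row.length then
    if PySem.Chars.isdigit row[i] then
      let j := pvRunEnd row (i + 1)
      let numbers' := if i ≤ 4 ∧ 3 ≤ j then
          numbers ++ [(PySem.Int.ofChars? (PySem.List.slice row (some (i : Int)) (some (j : Int)))).getD 0]
        else numbers
      pvScan row j numbers'
    else pvScan row (i + 1) numbers
  else numbers
termination_by row.length - i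
decreasing_by
  · have := pvRunEnd_ge row (i + 1); omega
  · omega

def getVerticalRow_alt (wholeRow : String) (index : Int) : List Int :=
  let row := PySem.List.slice wholeRow.toList (some (index - 3)) (some (index + 4))
  pvScan row 0 []

-- ===== PRECONDITION & SPEC =====
def Spec_getVerticalRow (wholeRow : String) (index : Int) (out : List Int) : Prop := out = getVerticalRow_alt wholeRow index
instance (wholeRow : String) (index : Int) (out : List Int) : Decidable (Spec_getVerticalRow wholeRow index out) := by unfold Spec_getVerticalRow; infer_instance

-- ===== CLAIM (what is proved, stated in full; the proofs are below) =====
def Claim_equal_getVerticalRow : Prop := ∀ (wholeRow : String) (index : Int), Dom_getVerticalRow wholeRow index → Spec_getVerticalRow wholeRow index (getVerticalRow wholeRow index)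

-- ===== LEMMAS AND PROOFS =====

theorem pvRunEnd_of_le (row : List Char) (j : Nat) (h : row.length ≤ j) : pvRunEnd row j = j := by
  rw [pvRunEnd]; simp [Nat.not_lt.mpr h]

theorem pvScan_eq (row : List Char) (i : Nat) (numbers : List Int) :
    pvScan row i numbers = pvScan row (pvRunEnd row i)
      (if i ≤ 4 ∧ 3 ≤ pvRunEnd row i ∧ i < pvRunEnd row i then
        numbers ++ [(PySem.Int.ofChars? ((row.drop i).take (pvRunEnd row i - i))).getD 0]
      else numbers) := by
  by_cases h : i < row.length
  · by_cases hd : PySem.Chars.isdigit row[i]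
    · have he : pvRunEnd row i = pvRunEnd row (i + 1) := by rw [pvRunEnd]; simp [h, hd]
      have hlt : i < pvRunEnd row (i + 1) := by have := pvRunEnd_ge row (i + 1); omega
      rw [pvScan]; simp only [h, dif_pos, hd, if_pos, he]
      congr 1
      rw [PySem.List.slice_natCast]
      have : (i ≤ 4 ∧ 3 ≤ pvRunEnd row (i + 1) ∧ i < pvRunEnd row (i + 1)) ↔
          (i ≤ 4 ∧ 3 ≤ pvRunEnd row (i + 1)) := by
        constructor
        · rintro ⟨a, b, _⟩; exact ⟨a, b⟩
        · rintro ⟨a, b⟩; exact ⟨a, b, hlt⟩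
      rw [if_congr this.symm rfl rfl]
    · have he : pvRunEnd row i = i := by rw [pvRunEnd]; simp [h, hd]
      rw [he]
      have : ¬ (i ≤ 4 ∧ 3 ≤ i ∧ i < i) := by omega
      rw [if_neg this]
  · have he : pvRunEnd row i = i := pvRunEnd_of_le row i (by omega)
    rw [he]
    have : ¬ (i ≤ 4 ∧ 3 ≤ i ∧ i < i) := by omega
    rw [if_neg this]

-- A's flush condition: the rebuilt index list [s, e) meets {2,3,4} iff s ≤ 4 and 3 ≤ e
theorem pvInterCond (s e : Nat) (hse : s < e) :
    (0 < (PySem.Set.inter (PySem.Set.ofList ((PySem.List.pyRange 0 ((e : Int) - (s : Int)) 1).map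
        (fun idx => (s : Int) + idx))) (PySem.Set.ofList [2, 3, 4])).length)
    ↔ (s ≤ 4 ∧ 3 ≤ e) := by
  rw [List.length_pos_iff_exists_mem]
  constructor
  · rintro ⟨x, hx⟩
    obtain ⟨h1, h2⟩ := (PySem.Set.mem_inter _ _ x).mp hx
    rw [PySem.Set.mem_ofList, List.mem_map] at h1
    obtain ⟨idx, hidx, rfl⟩ := h1
    rw [PySem.List.mem_pyRange_one] at hidx
    rw [PySem.Set.mem_ofList] at h2
    simp only [List.mem_cons, List.not_mem_nil, or_false] at h2
    omega
  · rintro ⟨h1, h2⟩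
    refine ⟨(max s 2 : Nat), (PySem.Set.mem_inter _ _ _).mpr ⟨?_, ?_⟩⟩
    · rw [PySem.Set.mem_ofList, List.mem_map]
      refine ⟨(max s 2 : Nat) - (s : Int), ?_, by ring⟩
      rw [PySem.List.mem_pyRange_one]
      constructor <;> push_cast <;> omega
    · rw [PySem.Set.mem_ofList]
      simp only [List.mem_cons, List.not_mem_nil]
      have : max s 2 = 2 ∨ max s 2 = 3 ∨ max s 2 = 4 := by omega
      rcases this with h | h | h <;> rw [h] <;> norm_num

-- A's step when the char is not a digit and no number is pending
theorem pvL1 (row : List Char) (nums : List Int) (i : Int) (c : Char)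
    (hd : PySem.Chars.isdigit c = false) : pvAstep row (nums, []) (i, c) = (nums, []) := by
  simp [pvAstep, hd]

-- A's step mid-run: the digit is appended, nothing is flushed
theorem pvL2 (row : List Char) (nums : List Int) (p : List Char) (i : Int) (c : Char)
    (hd : PySem.Chars.isdigit c = true) (hne : i ≠ (row.length : Int) - 1) :
    pvAstep row (nums, p) (i, c) = (nums, p ++ [c]) := by
  simp [pvAstep, hd, hne]

-- A's step flushing a run at a non-digit character
theorem pvL3 (row : List Char) (nums : List Int) (p : List Char) (s i : Nat) (c : Char)
    (hd : PySem.Chars.isdigit c = false) (hlen : p.length = i - s) (hsi : s < i) :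
    pvAstep row (nums, p) ((i : Int), c)
      = ((if s ≤ 4 ∧ 3 ≤ i then nums ++ [(PySem.Int.ofChars? p).getD 0] else nums), []) := by
  have hp : 0 < p.length := by omega
  simp only [pvAstep, hd, Bool.false_eq_true, if_false, Bool.not_false,
    Bool.and_false, hp, decide_true, Bool.true_or, Bool.and_true, if_true]
  rw [PySem.List.foldl_append_singleton_eq_map]
  have hc : ((i - s : Nat) : Int) = (i : Int) - (s : Int) := by omega
  simp only [hlen, hc]
  have harg : (i : Int) - ((i : Int) - (s : Int)) = (s : Int) := by ring
  simp only [List.nil_append, harg]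
  rw [if_congr (pvInterCond s i hsi) rfl rfl]

-- A's step at a last character that is a digit: accumulate and flush at shifted indexes
theorem pvL4 (row : List Char) (nums : List Int) (p : List Char) (s i : Nat) (c : Char)
    (hd : PySem.Chars.isdigit c = true) (hi : (i : Int) = (row.length : Int) - 1)
    (hlen : p.length = i - s) (hsi : s ≤ i) :
    pvAstep row (nums, p) ((i : Int), c)
      = ((if s ≤ 4 ∧ 3 ≤ row.length then nums ++ [(PySem.Int.ofChars? (p ++ [c])).getD 0]
          else nums), []) := by
  have hn : i + 1 = row.length := by omega
  have hbeq : (((i : Int)) == (row.length : Int) - 1) = true := by simp [hi]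
  have hp : 0 < (p ++ [c]).length := by simp
  simp only [pvAstep, hd, if_true, hbeq, Bool.and_true, hp, decide_true, Bool.not_true, Bool.or_true, if_true]
  rw [PySem.List.foldl_append_singleton_eq_map]
  have hlc : (p ++ [c]).length = i - s + 1 := by simp [hlen]
  have hc : ((i - s + 1 : Nat) : Int) = (row.length : Int) - (s : Int) := by omega
  simp only [hlc, hc, List.nil_append]
  have hf : (fun idx => (i : Int) - ((row.length : Int) - (s : Int)) + idx + 1)
      = fun idx : Int => (s : Int) + idx := by
    funext idx; omega
  rw [hf, if_congr (pvInterCond s row.length (by omega)) rfl rfl]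

-- the pending run grows by one character
theorem pvPending_succ (row : List Char) (s i : Nat) (hsi : s ≤ i) (hi : i < row.length) :
    (row.drop s).take (i - s) ++ [row[i]] = (row.drop s).take (i + 1 - s) := by
  have h1 : i + 1 - s = (i - s) + 1 := by omega
  rw [h1, List.take_add_one]
  have h2 : (row.drop s)[i - s]? = some row[i] := by
    have h3 : s + (i - s) = i := by omega
    rw [List.getElem?_drop, h3, List.getElem?_eq_getElem hi]
  rw [h2]; rfl

-- the loop invariant: A's fold from position i (run pending since s) equals B's scan
theorem pvLoop (row : List Char) (t : List Char) :
    ∀ (i s : Nat) (numbers : List Int), row.drop i = t → s ≤ i → (s < i → i < row.length) →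
      (∀ k (hk : k < row.length), s ≤ k → k < i → PySem.Chars.isdigit row[k]) →
      ((PySem.List.enumerate t (i : Int)).foldl (pvAstep row)
          (numbers, (row.drop s).take (i - s))).1
        = pvScan row (pvRunEnd row i)
            (if s ≤ 4 ∧ 3 ≤ pvRunEnd row i ∧ s < pvRunEnd row i then
              numbers ++ [(PySem.Int.ofChars? ((row.drop s).take (pvRunEnd row i - s))).getD 0]
            else numbers) := by
  induction t with
  | nil =>
    intro i s numbers hdrop hsi hmid _
    have hlen : row.length ≤ i := List.drop_eq_nil_iff.mp hdrop
    have hs : s = i := by by_contra h; exact absurd (hmid (by omega)) (by omega)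
    have he : pvRunEnd row i = i := pvRunEnd_of_le row i hlen
    rw [PySem.List.enumerate_nil]
    simp only [List.foldl_nil, he]
    rw [if_neg (by omega), pvScan]
    simp [Nat.not_lt.mpr hlen]
  | cons c t' ih =>
    intro i s numbers hdrop hsi hmid hdig
    have hlt : i < row.length := by
      by_contra h
      rw [List.drop_eq_nil_of_le (by omega)] at hdrop; exact absurd hdrop (by simp)
    have hcons := List.drop_eq_getElem_cons (l := row) (i := i) hlt
    rw [hdrop] at hcons
    obtain ⟨hc, hdrop'⟩ : c = row[i] ∧ t' = row.drop (i + 1) := by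
      injection hcons with a b; exact ⟨a, b⟩
    have hplen : ((row.drop s).take (i - s)).length = i - s := by
      rw [List.length_take, List.length_drop]; omega
    rw [PySem.List.enumerate_cons, List.foldl_cons]
    by_cases hd : PySem.Chars.isdigit row[i] = true
    · -- current char is a digit
      have he : pvRunEnd row i = pvRunEnd row (i + 1) := by rw [pvRunEnd]; simp [hlt, hd]
      by_cases hlast : i + 1 < row.length
      · -- run continues; no flush in this step
        rw [hc, pvL2 row numbers _ (i : Int) row[i] hd (by omega)]
        rw [pvPending_succ row s i hsi hlt]
        have := ih (i + 1) s numbers hdrop'.symm (by omega) (fun _ => hlast)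
          (fun k hk h1 h2 => by
            by_cases hki : k < i
            · exact hdig k hk h1 hki
            · have : k = i := by omega
              subst this; exact hd)
        push_cast at this ⊢
        rw [this, he]
      · -- the run reaches the last character: A flushes inside this step
        have hn : i + 1 = row.length := by omega
        have ht' : t' = [] := by rw [hdrop', List.drop_eq_nil_of_le (by omega)]
        rw [hc, pvL4 row numbers _ s i row[i] hd (by omega) hplen hsi]
        rw [pvPending_succ row s i hsi hlt]
        rw [ht', PySem.List.enumerate_nil, List.foldl_nil]
        have he2 : pvRunEnd row i = i + 1 := by rw [he]; exact pvRunEnd_of_le row (i + 1) (by omega)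
        rw [he2]
        have hcond : (s ≤ 4 ∧ 3 ≤ i + 1 ∧ s < i + 1) ↔ (s ≤ 4 ∧ 3 ≤ row.length) := by omega
        rw [if_congr hcond.symm rfl rfl, pvScan]
        simp [Nat.not_lt.mpr (le_of_eq hn.symm)]
    · -- current char is not a digit
      have hd' : PySem.Chars.isdigit row[i] = false := by simpa using hd
      have he : pvRunEnd row i = i := by rw [pvRunEnd]; simp [hlt, hd']
      have htail : ∀ N : List Int, ((PySem.List.enumerate t' ((i : Int) + 1)).foldl (pvAstep row)
          (N, ([] : List Char))).1 = pvScan row (i + 1) N := by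
        intro N
        have h0 := ih (i + 1) (i + 1) N hdrop'.symm le_rfl (by omega) (by omega)
        rw [← pvScan_eq row (i + 1) N] at h0
        simpa using h0
      by_cases hs : s = i
      · subst hs
        simp only [Nat.sub_self, List.take_zero]
        rw [hc, pvL1 row numbers (s : Int) row[s] hd', htail numbers, he]
        rw [if_neg (by omega)]
        conv_rhs => rw [pvScan]
        simp [hlt, hd']
      · have hsil : s < i := by omega
        rw [hc, pvL3 row numbers _ s i row[i] hd' hplen hsil]
        rw [htail _, he]
        rw [if_congr (show (s ≤ 4 ∧ 3 ≤ i ∧ s < i) ↔ (s ≤ 4 ∧ 3 ≤ i) by omega) rfl rfl]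
        conv_rhs => rw [pvScan]
        simp [hlt, hd']

-- ===== VERDICT (by name: the statement is the Claim_ definition above) =====
theorem getVerticalRow_spec : Claim_equal_getVerticalRow := by
  intro wholeRow index _
  unfold Spec_getVerticalRow getVerticalRow getVerticalRow_alt
  have h := pvLoop (PySem.List.slice wholeRow.toList (some (index - 3)) (some (index + 4)))
    (PySem.List.slice wholeRow.toList (some (index - 3)) (some (index + 4))) 0 0 [] rfl le_rfl
    (by omega) (by omega)
  rw [← pvScan_eq _ 0 []] at h
  simpa using h
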